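-- pv_equiv track=rewrite | github.com/earthly/website | util/psupport/psupport/scripts/set_category.py | add_new_category
-- ===== SOURCE A (Python) =====
-- def add_new_category(lines, new_category):
--     """Add a new category to the front matter."""
--     in_front_matter = False
--     new_lines = []
--     category_inserted = False
--
--     for line in lines:
--         new_lines.append(line)
--         if line.strip() == "---" and not in_front_matter:
--             in_front_matter = True
--             continue
--         if in_front_matter and line.strip() == "---" and not category_inserted:
--             new_lines.insert(-1, f"categories:\n  - {new_category}\n")
--             category_inserted = True
--             in_front_matter = False
--
--     return new_lines
-- ===== SOURCE B (Python) =====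
-- def add_new_category(lines, new_category):
--     """Add a new category to the front matter (locate-then-splice)."""
--     seen_open = False
--     for i, line in enumerate(lines):
--         if line.strip() == "---":
--             if seen_open:
--                 return lines[:i] + [f"categories:\n  - {new_category}\n"] + lines[i:]
--             seen_open = True
--     return list(lines)
-- ===== Notes on version B (the rewrite author's own statement) =====
-- stated objective: simpler
-- what changed: B locates the index of the second '---' delimiter and splices the category line in with one slice expression, replacing A's incremental append-plus-insert(-1) build with two boolean flags.
import Mathlib
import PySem

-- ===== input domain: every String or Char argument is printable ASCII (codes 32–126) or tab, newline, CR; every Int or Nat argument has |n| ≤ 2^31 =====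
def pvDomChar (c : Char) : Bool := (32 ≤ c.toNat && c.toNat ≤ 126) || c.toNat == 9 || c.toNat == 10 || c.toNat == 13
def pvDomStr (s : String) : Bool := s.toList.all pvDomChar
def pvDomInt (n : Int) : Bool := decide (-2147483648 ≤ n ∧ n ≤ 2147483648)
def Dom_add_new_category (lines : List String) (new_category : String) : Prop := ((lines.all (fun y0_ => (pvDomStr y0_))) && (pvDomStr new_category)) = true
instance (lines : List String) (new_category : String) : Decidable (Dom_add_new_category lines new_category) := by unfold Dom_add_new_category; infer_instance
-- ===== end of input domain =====

-- B replaces A's incremental append-plus-insert(-1) build (two flags) by locating the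
-- second '---' delimiter and splicing the category line in with one slice; same O(n) cost.

-- ===== PORT A =====
-- loop body of A's for-loop; state = (in_front_matter, new_lines, category_inserted)
def aStep (new_category : String) (st : Bool × List String × Bool) (line : String) :
    Bool × List String × Bool :=
  let fm := st.1
  let acc := st.2.1 ++ [line]          -- new_lines.append(line)
  let ins := st.2.2
  if PySem.Str.strip line == "---" && !fm then (true, acc, ins)   -- continue
  else if fm && (PySem.Str.strip line == "---") && !ins then
    (false, PySem.List.insert acc (-1) ("categories:\n  - " ++ new_category ++ "\n"), true)
  else (fm, acc, ins)

def add_new_category (lines : List String) (new_category : String) : List String :=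
  (lines.foldl (aStep new_category) (false, [], false)).2.1

-- ===== PORT B =====
-- index of the second stripped '---' line (seen = whether the first was already seen)
def findSecondSep : List String → Bool → Option Nat
  | [], _ => none
  | l :: rest, seen =>
    if PySem.Str.strip l == "---" then
      if seen then some 0
      else (findSecondSep rest true).map (· + 1)
    else (findSecondSep rest seen).map (· + 1)

def add_new_category_alt (lines : List String) (new_category : String) : List String :=
  match findSecondSep lines false with
  | some i => lines.take i ++ ("categories:\n  - " ++ new_category ++ "\n") :: lines.drop i
  | none => lines

-- ===== PRECONDITION & SPEC =====
def Spec_add_new_category (lines : List String) (new_category : String) (out : List String) : Prop := out = add_new_category_alt lines new_category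
instance (lines : List String) (new_category : String) (out : List String) : Decidable (Spec_add_new_category lines new_category out) := by unfold Spec_add_new_category; infer_instance

-- ===== CLAIM (what is proved, stated in full; the proofs are below) =====
def Claim_equal_add_new_category : Prop := ∀ (lines : List String) (new_category : String), Dom_add_new_category lines new_category → Spec_add_new_category lines new_category (add_new_category lines new_category)

-- ===== LEMMAS AND PROOFS =====

-- list.insert(-1, v) on a nonempty list puts v before the last element
theorem insert_neg_one (acc : List String) (l v : String) :
    PySem.List.insert (acc ++ [l]) (-1) v = acc ++ [v, l] := by
  simp only [PySem.List.insert, PySem.List.sliceIndices]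
  norm_num

-- one-step reductions of A's loop body
theorem aStep_sep_out (nc l : String) (acc : List String) (ins : Bool)
    (hs : (PySem.Str.strip l == "---") = true) :
    aStep nc (false, acc, ins) l = (true, acc ++ [l], ins) := by
  simp [aStep, hs]

theorem aStep_sep_in (nc l : String) (acc : List String)
    (hs : (PySem.Str.strip l == "---") = true) :
    aStep nc (true, acc, false) l
      = (false, acc ++ [("categories:\n  - " ++ nc ++ "\n"), l], true) := by
  simp [aStep, hs, insert_neg_one]

theorem aStep_nosep (nc l : String) (acc : List String) (fm ins : Bool)
    (hs : (PySem.Str.strip l == "---") = false) :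
    aStep nc (fm, acc, ins) l = (fm, acc ++ [l], ins) := by
  simp [aStep, hs]

-- once category_inserted is true the loop only appends
theorem fold_done (nc : String) :
    ∀ (ls : List String) (fm : Bool) (acc : List String),
      ((ls.foldl (aStep nc) (fm, acc, true)).2.1) = acc ++ ls := by
  intro ls
  induction ls with
  | nil => intro fm acc; simp
  | cons l rest ih =>
    intro fm acc
    rcases hs : (PySem.Str.strip l == "---") with _ | _ <;> cases fm <;>
      simp [aStep, hs, ih]

-- main invariant: before insertion the loop computes the splice at the second delimiter
theorem fold_main (nc : String) :
    ∀ (ls : List String) (fm : Bool) (acc : List String),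
      ((ls.foldl (aStep nc) (fm, acc, false)).2.1) =
        match findSecondSep ls fm with
        | some i => acc ++ ls.take i ++ ("categories:\n  - " ++ nc ++ "\n") :: ls.drop i
        | none => acc ++ ls := by
  intro ls
  induction ls with
  | nil => intro fm acc; simp [findSecondSep]
  | cons l rest ih =>
    intro fm acc
    rcases hs : (PySem.Str.strip l == "---") with _ | _
    · rw [List.foldl_cons, aStep_nosep nc l acc fm false hs, ih fm (acc ++ [l])]
      cases h2 : findSecondSep rest fm <;> simp [findSecondSep, hs, h2]
    · cases fm with
      | false =>
        rw [List.foldl_cons, aStep_sep_out nc l acc false hs, ih true (acc ++ [l])]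
        cases h2 : findSecondSep rest true <;> simp [findSecondSep, hs, h2]
      | true =>
        rw [List.foldl_cons, aStep_sep_in nc l acc hs, fold_done]
        simp [findSecondSep, hs]

-- ===== VERDICT (by name: the statement is the Claim_ definition above) =====
theorem add_new_category_spec : Claim_equal_add_new_category := by
  intro lines nc _
  unfold Spec_add_new_category add_new_category add_new_category_alt
  rw [fold_main]
  cases h : findSecondSep lines false <;> simp
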